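-- pv_equiv track=rewrite | github.com/themp731/Skattebot | md_to_html.py | preprocess_markdown_tables
-- ===== SOURCE A (Python) =====
-- def preprocess_markdown_tables(content):
--     """
--     Fix table formatting issues before markdown processing.
--     The nl2br extension breaks tables by adding <br> between rows.
--     This function normalizes tables to ensure proper parsing.
--     """
--     lines = content.split('\n')
--     result = []
--     in_table = False
--     table_buffer = []
--
--     for line in lines:
--         stripped = line.strip()
--
--         is_table_row = stripped.startswith('|') and stripped.endswith('|')
--         is_separator = stripped.startswith('|') and set(stripped.replace('|', '').replace('-', '').replace(':', '').strip()) == set()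
--
--         if is_table_row or is_separator:
--             if not in_table:
--                 in_table = True
--                 if result and result[-1].strip():
--                     result.append('')
--             table_buffer.append(stripped)
--         else:
--             if in_table:
--                 result.extend(table_buffer)
--                 result.append('')
--                 table_buffer = []
--                 in_table = False
--             result.append(line)
--
--     if table_buffer:
--         result.extend(table_buffer)
--
--     return '\n'.join(result)
-- ===== SOURCE B (Python) =====
-- def preprocess_markdown_tables(content):
--     def is_table(line):
--         s = line.strip()
--         return s.startswith('|') and (s.endswith('|') or
--                not s.replace('|', '').replace('-', '').replace(':', '').strip())
--
--     # group the lines into maximal runs of the same class (table / non-table)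
--     groups = []
--     for line in content.split('\n'):
--         cls = is_table(line)
--         if groups and groups[-1][0] == cls:
--             groups[-1][1].append(line)
--         else:
--             groups.append((cls, [line]))
--
--     out = []
--     for i, (cls, group) in enumerate(groups):
--         if cls:
--             if out and out[-1].strip():
--                 out.append('')
--             out.extend(l.strip() for l in group)
--             if i != len(groups) - 1:
--                 out.append('')
--         else:
--             out.extend(group)
--     return '\n'.join(out)
-- ===== Notes on version B (the rewrite author's own statement) =====
-- stated objective: idiomatic
-- what changed: Replaced A's single-pass in_table/table_buffer state machine with a two-phase decomposition: first group the lines into maximal table/non-table runs, then emit each group (blank line before a table run when the last emitted line is nonblank, blank line after it unless it is the last group).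
import Mathlib
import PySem

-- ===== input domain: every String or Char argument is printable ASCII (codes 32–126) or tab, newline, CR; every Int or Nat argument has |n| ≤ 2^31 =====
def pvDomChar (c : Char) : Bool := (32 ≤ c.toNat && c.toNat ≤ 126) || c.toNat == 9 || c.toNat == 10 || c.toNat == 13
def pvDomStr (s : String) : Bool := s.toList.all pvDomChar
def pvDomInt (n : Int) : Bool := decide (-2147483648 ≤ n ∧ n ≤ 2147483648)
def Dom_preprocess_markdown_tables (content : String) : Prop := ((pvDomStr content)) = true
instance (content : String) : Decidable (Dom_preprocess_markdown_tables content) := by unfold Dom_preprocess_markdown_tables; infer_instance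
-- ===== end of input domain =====

-- B replaces A's in_table/table_buffer state machine by a two-phase group-then-emit
-- decomposition (group lines into maximal table/non-table runs, then emit); objective: idiomatic.


-- ===== PORT A =====
-- 'if result and result[-1].strip(): result.append('')' — the same literal line occurs in both Pythons
def pvPad (res : List String) : List String :=
  match res.getLast? with
  | some l => if PySem.Str.strip l ≠ "" then res ++ [""] else res
  | none => res

-- one iteration of A's for-loop; state = (result, in_table, table_buffer)
def pvStepA (st : List String × Bool × List String) (line : String) : List String × Bool × List String :=
  let result := st.1
  let in_table := st.2.1
  let table_buffer := st.2.2
  let stripped := PySem.Str.strip line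
  let is_table_row := PySem.Str.startswith stripped "|" && PySem.Str.endswith stripped "|"
  let is_separator := PySem.Str.startswith stripped "|" &&
    PySem.Set.equal
      (PySem.Set.ofList (PySem.Str.strip
        (PySem.Str.replace (PySem.Str.replace (PySem.Str.replace stripped "|" "") "-" "") ":" "")).toList)
      (PySem.Set.ofList ([] : List Char))
  if is_table_row || is_separator then
    if !in_table then (pvPad result, true, table_buffer ++ [stripped])
    else (result, true, table_buffer ++ [stripped])
  else
    if in_table then (result ++ table_buffer ++ [""] ++ [line], false, [])
    else (result ++ [line], false, table_buffer)

def preprocess_markdown_tables (content : String) : String :=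
  let lines := (PySem.Str.split? content "\n").getD []
  let st := lines.foldl pvStepA ([], false, [])
  PySem.Str.join "\n" (st.1 ++ st.2.2)

-- ===== PORT B =====
-- B's is_table helper
def pvIsTable (line : String) : Bool :=
  let s := PySem.Str.strip line
  PySem.Str.startswith s "|" &&
    (PySem.Str.endswith s "|" ||
      (PySem.Str.strip (PySem.Str.replace (PySem.Str.replace (PySem.Str.replace s "|" "") "-" "") ":" "") == ""))

-- group the lines into maximal runs of the same class (Source B's grouping loop, span form)
def pvGroups : List String → List (Bool × List String)
  | [] => []
  | l :: ls =>
    let cls := pvIsTable l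
    (cls, l :: ls.takeWhile (fun x => pvIsTable x == cls)) ::
      pvGroups (ls.dropWhile (fun x => pvIsTable x == cls))
termination_by ls => ls.length
decreasing_by
  exact Nat.lt_succ_of_le (List.length_dropWhile_le _ _)

-- Source B's emit loop over the groups ('i != len(groups)-1' ↔ some groups remain)
def pvEmit : List (Bool × List String) → List String → List String
  | [], out => out
  | (cls, g) :: rest, out =>
    if cls then
      let out1 := pvPad out
      let out2 := out1 ++ g.map PySem.Str.strip
      pvEmit rest (if rest.isEmpty then out2 else out2 ++ [""])
    else
      pvEmit rest (out ++ g)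

def preprocess_markdown_tables_alt (content : String) : String :=
  PySem.Str.join "\n" (pvEmit (pvGroups ((PySem.Str.split? content "\n").getD [])) [])

-- ===== PRECONDITION & SPEC =====
def Spec_preprocess_markdown_tables (content : String) (out : String) : Prop := out = preprocess_markdown_tables_alt content
instance (content : String) (out : String) : Decidable (Spec_preprocess_markdown_tables content out) := by unfold Spec_preprocess_markdown_tables; infer_instance

-- ===== CLAIM (what is proved, stated in full; the proofs are below) =====
def Claim_equal_preprocess_markdown_tables : Prop := ∀ (content : String), Dom_preprocess_markdown_tables content → Spec_preprocess_markdown_tables content (preprocess_markdown_tables content)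

-- ===== LEMMAS AND PROOFS =====

lemma pvBeqEmpty (s : String) : (s == "") = (s.toList == []) := by
  rw [Bool.eq_iff_iff]; simp only [beq_iff_eq]
  exact ⟨fun h => by subst h; rfl, fun h => String.toList_inj.mp (by simpa using h)⟩

lemma pvSetEmpty (y : String) :
    PySem.Set.equal (PySem.Set.ofList y.toList) (PySem.Set.ofList ([] : List Char)) = (y == "") := by
  rw [pvBeqEmpty]
  generalize y.toList = cs
  cases cs with
  | nil => decide
  | cons c cs => simp [PySem.Set.equal, PySem.Set.issubset]

-- A's 'is_table_row or is_separator' is B's is_table predicate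
lemma pvCond_eq (line : String) :
    (let stripped := PySem.Str.strip line
     (PySem.Str.startswith stripped "|" && PySem.Str.endswith stripped "|") ||
     (PySem.Str.startswith stripped "|" &&
       PySem.Set.equal
         (PySem.Set.ofList (PySem.Str.strip
           (PySem.Str.replace (PySem.Str.replace (PySem.Str.replace stripped "|" "") "-" "") ":" "")).toList)
         (PySem.Set.ofList ([] : List Char)))) = pvIsTable line := by
  simp only [pvIsTable, pvSetEmpty]
  rw [Bool.and_or_distrib_left]

lemma pvStepA_true_out (res buf : List String) (line : String) (h : pvIsTable line = true) :
    pvStepA (res, false, buf) line = (pvPad res, true, buf ++ [PySem.Str.strip line]) := by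
  have hc := pvCond_eq line
  simp only [] at hc
  simp only [pvStepA, hc, h]
  simp

lemma pvStepA_true_in (res buf : List String) (line : String) (h : pvIsTable line = true) :
    pvStepA (res, true, buf) line = (res, true, buf ++ [PySem.Str.strip line]) := by
  have hc := pvCond_eq line
  simp only [] at hc
  simp only [pvStepA, hc, h]
  simp

lemma pvStepA_false_out (res buf : List String) (line : String) (h : pvIsTable line = false) :
    pvStepA (res, false, buf) line = (res ++ [line], false, buf) := by
  have hc := pvCond_eq line
  simp only [] at hc
  simp only [pvStepA, hc, h]
  simp

lemma pvStepA_false_in (res buf : List String) (line : String) (h : pvIsTable line = false) :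
    pvStepA (res, true, buf) line = (res ++ buf ++ [""] ++ [line], false, []) := by
  have hc := pvCond_eq line
  simp only [] at hc
  simp only [pvStepA, hc, h]
  simp

lemma pvFoldA_nontable (g : List String) (out : List String)
    (h : ∀ l ∈ g, pvIsTable l = false) :
    g.foldl pvStepA (out, false, []) = (out ++ g, false, []) := by
  induction g generalizing out with
  | nil => simp
  | cons l g ih =>
    rw [List.foldl_cons, pvStepA_false_out out [] l (h l (by simp)),
      ih (out ++ [l]) (fun x hx => h x (by simp [hx]))]
    simp

lemma pvFoldA_table (g : List String) (out buf : List String)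
    (h : ∀ l ∈ g, pvIsTable l = true) :
    g.foldl pvStepA (out, true, buf) = (out, true, buf ++ g.map PySem.Str.strip) := by
  induction g generalizing buf with
  | nil => simp
  | cons l g ih =>
    rw [List.foldl_cons, pvStepA_true_in out buf l (h l (by simp)),
      ih (buf ++ [PySem.Str.strip l]) (fun x hx => h x (by simp [hx]))]
    simp

lemma pvHeadDrop (p : String → Bool) (l : List String) (r : String) (rs : List String)
    (h : l.dropWhile p = r :: rs) : p r = false := by
  have hne : l.dropWhile p ≠ [] := by simp [h]
  have := List.head_dropWhile_not p hne
  simpa [h] using this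

lemma pvMain : ∀ (n : Nat) (lines : List String), lines.length ≤ n → ∀ out : List String,
    (let st := lines.foldl pvStepA (out, false, []); st.1 ++ st.2.2) =
      pvEmit (pvGroups lines) out := by
  intro n
  induction n with
  | zero =>
    intro lines hl out
    have : lines = [] := List.length_eq_zero_iff.mp (Nat.le_zero.mp hl)
    simp [this, pvGroups, pvEmit]
  | succ n ih =>
    intro lines hl out
    match lines with
    | [] => simp [pvGroups, pvEmit]
    | l :: ls =>
      have hls : ls.length ≤ n := Nat.lt_succ_iff.mp (by simpa using hl)
      cases h : pvIsTable l with
      | false =>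
        have hsplit : l :: ls =
            (l :: ls.takeWhile (fun x => pvIsTable x == false)) ++
              ls.dropWhile (fun x => pvIsTable x == false) := by
          simp [List.takeWhile_append_dropWhile]
        have hall : ∀ x ∈ l :: ls.takeWhile (fun x => pvIsTable x == false), pvIsTable x = false := by
          intro x hx
          rcases List.mem_cons.mp hx with hx | hx
          · subst hx; exact h
          · simpa using List.mem_takeWhile_imp hx
        have hfold : (l :: ls).foldl pvStepA (out, false, []) =
            (ls.dropWhile (fun x => pvIsTable x == false)).foldl pvStepA
              (out ++ (l :: ls.takeWhile (fun x => pvIsTable x == false)), false, []) := by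
          conv_lhs => rw [hsplit]
          rw [List.foldl_append, pvFoldA_nontable _ out hall]
        have hlen : (ls.dropWhile (fun x => pvIsTable x == false)).length ≤ n :=
          le_trans (List.length_dropWhile_le _ _) hls
        have hgroups : pvGroups (l :: ls) =
            (false, l :: ls.takeWhile (fun x => pvIsTable x == false)) ::
              pvGroups (ls.dropWhile (fun x => pvIsTable x == false)) := by
          rw [pvGroups]; simp [h]
        rw [hgroups]
        simp only [hfold, pvEmit, Bool.false_eq_true, if_false]
        exact ih _ hlen _
      | true =>
        have hsplit : l :: ls =
            (l :: ls.takeWhile (fun x => pvIsTable x == true)) ++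
              ls.dropWhile (fun x => pvIsTable x == true) := by
          simp [List.takeWhile_append_dropWhile]
        have htw : ∀ x ∈ ls.takeWhile (fun x => pvIsTable x == true), pvIsTable x = true := by
          intro x hx; simpa using List.mem_takeWhile_imp hx
        have hfold : (l :: ls).foldl pvStepA (out, false, []) =
            (ls.dropWhile (fun x => pvIsTable x == true)).foldl pvStepA
              (pvPad out, true, (l :: ls.takeWhile (fun x => pvIsTable x == true)).map PySem.Str.strip) := by
          conv_lhs => rw [hsplit]
          rw [List.foldl_append, List.foldl_cons, pvStepA_true_out out [] l h,
            pvFoldA_table _ (pvPad out) _ htw]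
          simp
        have hgroups : pvGroups (l :: ls) =
            (true, l :: ls.takeWhile (fun x => pvIsTable x == true)) ::
              pvGroups (ls.dropWhile (fun x => pvIsTable x == true)) := by
          rw [pvGroups]; simp [h]
        rw [hgroups]
        cases hdw : ls.dropWhile (fun x => pvIsTable x == true) with
        | nil =>
          rw [hdw] at hfold
          simp only [hfold, List.foldl_nil, pvEmit, pvGroups, List.isEmpty_nil, if_true]
        | cons r rs =>
          have hr : pvIsTable r = false := by
            have := pvHeadDrop (fun x => pvIsTable x == true) ls r rs hdw
            simpa using this
          have hswap : (r :: rs).foldl pvStepA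
              (pvPad out, true, (l :: ls.takeWhile (fun x => pvIsTable x == true)).map PySem.Str.strip) =
              rs.foldl pvStepA
                (pvPad out ++ (l :: ls.takeWhile (fun x => pvIsTable x == true)).map PySem.Str.strip ++ [""] ++ [r],
                  false, []) := by
            rw [List.foldl_cons, pvStepA_false_in _ _ _ hr]
          have hemit : pvEmit ((true, l :: ls.takeWhile (fun x => pvIsTable x == true)) :: pvGroups (r :: rs)) out =
              pvEmit (pvGroups (r :: rs))
                (pvPad out ++ (l :: ls.takeWhile (fun x => pvIsTable x == true)).map PySem.Str.strip ++ [""]) := by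
            rw [pvEmit]
            have hne : (pvGroups (r :: rs)).isEmpty = false := by rw [pvGroups]; rfl
            simp [hne]
          have hlen' : (r :: rs).length ≤ n := by
            rw [← hdw]; exact le_trans (List.length_dropWhile_le _ _) hls
          have hih := ih (r :: rs) hlen'
            (pvPad out ++ (l :: ls.takeWhile (fun x => pvIsTable x == true)).map PySem.Str.strip ++ [""])
          rw [List.foldl_cons, pvStepA_false_out _ _ _ hr] at hih
          rw [hdw] at hfold
          simp only [hfold, hswap, hemit]
          simpa using hih

-- ===== VERDICT (by name: the statement is the Claim_ definition above) =====
theorem preprocess_markdown_tables_spec : Claim_equal_preprocess_markdown_tables := by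
  intro content _
  unfold Spec_preprocess_markdown_tables preprocess_markdown_tables preprocess_markdown_tables_alt
  have := pvMain ((PySem.Str.split? content "\n").getD []).length ((PySem.Str.split? content "\n").getD []) le_rfl []
  exact congrArg (PySem.Str.join "\n") (by simpa using this)
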